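-- pv_equiv track=rewrite | github.com/kellyoconor/shelly-kelly | netty-basic.py | _has_followup
-- ===== SOURCE A (Python) =====
-- from typing import List, Dict, Set, Tuple
--
-- def _has_followup(lines: List[str], start_index: int) -> bool:
--     """Check if there's a follow-up mention in the next few lines"""
--     followup_keywords = ['update', 'follow', 'later', 'outcome', 'result', 'went well', 'turned out']
--
--     # Check next 5 lines
--     for i in range(start_index + 1, min(start_index + 6, len(lines))):
--         line_lower = lines[i].lower()
--         for keyword in followup_keywords:
--             if keyword in line_lower:
--                 return True
--     return False
-- ===== SOURCE B (Python) =====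
-- def _has_followup(lines, start_index):
--     """Check if there's a follow-up mention in the next few lines"""
--     followup_keywords = ['update', 'follow', 'later', 'outcome', 'result', 'went well', 'turned out']
--
--     # Keyword-major search: for each keyword, walk the window recursively with a
--     # countdown of 5 remaining lines instead of an index range capped by min().
--     def seen(kw, i, remaining):
--         if remaining == 0 or i >= len(lines):
--             return False
--         if kw in lines[i].lower():
--             return True
--         return seen(kw, i + 1, remaining - 1)
--
--     return any(seen(kw, start_index + 1, 5) for kw in followup_keywords)
-- ===== Notes on version B (the rewrite author's own statement) =====
-- stated objective: alternative
-- what changed: B searches keyword-major (outer loop over keywords) and walks the 5-line window with a recursive countdown that stops at end-of-list, instead of A's line-major index loop over a min()-capped range with an inner keyword scan.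
import Mathlib
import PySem

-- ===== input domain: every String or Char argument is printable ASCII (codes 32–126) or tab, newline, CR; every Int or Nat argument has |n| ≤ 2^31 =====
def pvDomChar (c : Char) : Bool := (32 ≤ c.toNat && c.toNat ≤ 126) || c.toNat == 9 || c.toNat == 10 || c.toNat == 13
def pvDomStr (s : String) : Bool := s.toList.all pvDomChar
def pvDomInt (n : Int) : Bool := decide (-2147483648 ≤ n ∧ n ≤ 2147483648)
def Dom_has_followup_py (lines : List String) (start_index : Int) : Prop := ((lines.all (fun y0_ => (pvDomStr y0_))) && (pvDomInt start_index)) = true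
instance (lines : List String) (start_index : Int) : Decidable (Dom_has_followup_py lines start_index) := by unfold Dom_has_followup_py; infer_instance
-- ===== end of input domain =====

-- B searches keyword-major with a recursive 5-step countdown over the window instead of A's line-major min-capped index loop with an inner keyword scan (alternative decomposition, same cost); Pre_ excludes exactly the inputs where both programs raise IndexError (window start below -len while the window is nonempty).


-- ===== PORT A =====
-- A: for each index in range(start_index+1, min(start_index+6, len(lines))), lower the
-- line and scan each keyword; the early 'return True' becomes List.any.
def has_followup_py (lines : List String) (start_index : Int) : Bool :=
  let followup_keywords := ["update", "follow", "later", "outcome", "result", "went well", "turned out"]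
  (PySem.List.pyRange (start_index + 1) (min (start_index + 6) (lines.length : Int)) 1).any
    (fun i =>
      match PySem.List.pyGet? lines i with
      | some line => followup_keywords.any (fun kw => PySem.Str.isIn kw (PySem.Str.lower line))
      | none => false)

-- ===== PORT B =====
-- B's inner 'seen(kw, i, remaining)': countdown recursion over the window.
def pvSeen (lines : List String) (kw : String) : Int → Nat → Bool
  | _, 0 => false
  | i, r + 1 =>
    if (lines.length : Int) ≤ i then false
    else
      match PySem.List.pyGet? lines i with
      | some line =>
          if PySem.Str.isIn kw (PySem.Str.lower line) then true
          else pvSeen lines kw (i + 1) r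
      | none => false

-- B: any(seen(kw, start_index + 1, 5) for kw in followup_keywords)
def has_followup_py_alt (lines : List String) (start_index : Int) : Bool :=
  let followup_keywords := ["update", "follow", "later", "outcome", "result", "went well", "turned out"]
  followup_keywords.any (fun kw => pvSeen lines kw (start_index + 1) 5)

-- ===== PRECONDITION & SPEC =====
-- Pre_ excludes exactly the inputs on which the Python A raises IndexError (and B raises
-- it at the same index): the window start start_index+1 is below -len(lines) while the
-- loop/recursion still visits it (start_index+1 < len(lines)).
def Pre_has_followup_py (lines : List String) (start_index : Int) : Prop :=
  -(lines.length : Int) ≤ start_index + 1 ∨ (lines.length : Int) ≤ start_index + 1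
instance (lines : List String) (start_index : Int) : Decidable (Pre_has_followup_py lines start_index) := by unfold Pre_has_followup_py; infer_instance

def pvWitness_has_followup_py : List String × Int := (["no news", "an Update arrived"], 0)

def Spec_has_followup_py (lines : List String) (start_index : Int) (out : Bool) : Prop := out = has_followup_py_alt lines start_index
instance (lines : List String) (start_index : Int) (out : Bool) : Decidable (Spec_has_followup_py lines start_index out) := by unfold Spec_has_followup_py; infer_instance

-- ===== CLAIM (what is proved, stated in full; the proofs are below) =====
def Claim_equal_has_followup_py : Prop := ∀ (lines : List String) (start_index : Int), Dom_has_followup_py lines start_index → Pre_has_followup_py lines start_index → Spec_has_followup_py lines start_index (has_followup_py lines start_index)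

-- ===== LEMMAS AND PROOFS =====

-- B's countdown recursion from a over r steps visits exactly the indices of A's
-- min-capped range, provided the start is not below -len (so pyGet? never returns none).
theorem seen_eq_range (lines : List String) (kw : String) (r : Nat) :
    ∀ a : Int, (-(lines.length : Int) ≤ a ∨ (lines.length : Int) ≤ a) →
    pvSeen lines kw a r =
      (PySem.List.pyRange a (min (a + r) (lines.length : Int)) 1).any
        (fun i => match PySem.List.pyGet? lines i with
          | some line => PySem.Str.isIn kw (PySem.Str.lower line)
          | none => false) := by
  induction r with
  | zero =>
    intro a _
    rw [PySem.List.pyRange_one_eq_nil (by omega)]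
    rfl
  | succ r ih =>
    intro a ha
    by_cases hlen : (lines.length : Int) ≤ a
    · rw [PySem.List.pyRange_one_eq_nil (by omega)]
      simp [pvSeen, hlen]
    · have ha' : -(lines.length : Int) ≤ a := by omega
      have hlt : a < min (a + (r + 1 : Nat)) (lines.length : Int) := by
        push_cast; omega
      rw [PySem.List.pyRange_one_cons hlt]
      have hmin : min (a + ((r : Nat) + 1 : Nat)) (lines.length : Int)
          = min ((a + 1) + (r : Nat)) (lines.length : Int) := by
        push_cast; ring_nf
      obtain ⟨line, hline⟩ : ∃ line, PySem.List.pyGet? lines a = some line := by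
        rcases h : PySem.List.pyGet? lines a with _ | line
        · rw [PySem.List.pyGet?_eq_none_iff] at h
          exact absurd ⟨ha', by omega⟩ h
        · exact ⟨line, rfl⟩
      rw [List.any_cons]
      simp only [pvSeen, if_neg hlen, hline]
      rw [hmin, ← ih (a + 1) (Or.inl (by omega))]
      cases hk : PySem.Str.isIn kw (PySem.Str.lower line)
      · simp [hk]
      · simp

-- pushing the inner keyword scan through the optional line
theorem match_any_comm (o : Option String) (ks : List String) (f : String → String → Bool) :
    (match o with
      | some line => ks.any (fun kw => f kw line)
      | none => false)
    = ks.any (fun kw => match o with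
      | some line => f kw line
      | none => false) := by
  cases o <;> simp

-- swapping the two 'any' scans
theorem any_any_comm {α β : Type} (l : List α) (m : List β) (g : α → β → Bool) :
    (l.any fun x => m.any fun y => g x y) = (m.any fun y => l.any fun x => g x y) := by
  rw [Bool.eq_iff_iff, List.any_eq_true, List.any_eq_true]
  constructor
  · rintro ⟨x, hx, h⟩
    obtain ⟨y, hy, hg⟩ := List.any_eq_true.mp h
    exact ⟨y, hy, List.any_eq_true.mpr ⟨x, hx, hg⟩⟩
  · rintro ⟨y, hy, h⟩
    obtain ⟨x, hx, hg⟩ := List.any_eq_true.mp h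
    exact ⟨x, hx, List.any_eq_true.mpr ⟨y, hy, hg⟩⟩

theorem anyCongr {α : Type} (l : List α) (f g : α → Bool) (h : ∀ x, f x = g x) :
    l.any f = l.any g := by
  induction l with
  | nil => rfl
  | cons a rest ih => simp only [List.any_cons, h, ih]

-- ===== VERDICT (by name: the statement is the Claim_ definition above) =====
theorem has_followup_py_spec : Claim_equal_has_followup_py := by
  intro lines start_index _hdom hpre
  unfold Spec_has_followup_py has_followup_py has_followup_py_alt
  simp only []
  rw [anyCongr _ _ _ (fun i => match_any_comm (PySem.List.pyGet? lines i) _ (fun kw line => PySem.Str.isIn kw (PySem.Str.lower line)))]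
  rw [any_any_comm]
  apply anyCongr
  intro kw
  have h6 : start_index + 6 = (start_index + 1) + ((5 : Nat) : Int) := by push_cast; ring
  rw [h6, ← seen_eq_range lines kw 5 (start_index + 1) hpre]
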